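-- pv_equiv track=rewrite | github.com/vignesh-saptarishi/docspatial | docspatial/geometry.py | quad_ocr_to_rect_std
-- ===== SOURCE A (Python) =====
-- def quad_ocr_to_rect_std(vertices):
--     # if isinstance(vertices, google._upb._message.RepeatedCompositeContainer):
--     #     all_x = [v.x for v in vertices]
--     #     all_y = [v.y for v in vertices]
--     # else:
--     all_x = [v["x"] for v in vertices]
--     all_y = [v["y"] for v in vertices]
--     left = min(all_x)
--     right = max(all_x)
--     top = min(all_y)
--     bottom = max(all_y)
--     return [left, top, right, bottom]
-- ===== SOURCE B (Python) =====
-- def quad_ocr_to_rect_std(vertices):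
--     it = iter(vertices)
--     try:
--         first = next(it)
--     except StopIteration:
--         raise ValueError("quad_ocr_to_rect_std: empty vertices")
--     left = right = first["x"]
--     top = bottom = first["y"]
--     for v in it:
--         x = v["x"]
--         y = v["y"]
--         if x < left:
--             left = x
--         if x > right:
--             right = x
--         if y < top:
--             top = y
--         if y > bottom:
--             bottom = y
--     return [left, top, right, bottom]
-- ===== Notes on version B (the rewrite author's own statement) =====
-- stated objective: alternative
-- what changed: Replaces the two projected lists and four min/max scans by a single pass over the vertices maintaining four running accumulators (left, right, top, bottom).
import Mathlib
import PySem

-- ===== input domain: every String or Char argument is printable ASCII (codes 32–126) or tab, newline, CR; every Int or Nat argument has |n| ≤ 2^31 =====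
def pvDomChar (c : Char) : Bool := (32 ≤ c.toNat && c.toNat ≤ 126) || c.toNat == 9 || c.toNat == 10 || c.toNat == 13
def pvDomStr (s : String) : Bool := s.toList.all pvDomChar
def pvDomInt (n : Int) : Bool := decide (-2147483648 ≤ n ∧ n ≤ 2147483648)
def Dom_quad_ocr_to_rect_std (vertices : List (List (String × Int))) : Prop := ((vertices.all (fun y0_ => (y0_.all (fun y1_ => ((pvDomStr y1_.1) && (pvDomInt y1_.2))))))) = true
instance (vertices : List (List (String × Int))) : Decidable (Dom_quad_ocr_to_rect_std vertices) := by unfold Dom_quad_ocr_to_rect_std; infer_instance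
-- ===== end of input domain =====

-- B replaces A's two projected coordinate lists and four min/max calls by one pass
-- over the vertices maintaining four running accumulators (alternative decomposition).


-- ===== PORT A =====
-- v["x"]: first-match association-list lookup (Pre_ guarantees the key is present;
-- 0 is never used under Pre_ — a missing key is Python's KeyError, excluded by Pre_)
def pvGetKey (v : List (String × Int)) (k : String) : Int := (v.lookup k).getD 0

def quad_ocr_to_rect_std (vertices : List (List (String × Int))) : List Int :=
  let all_x := vertices.map (fun v => pvGetKey v "x")
  let all_y := vertices.map (fun v => pvGetKey v "y")
  match PySem.List.min? all_x (fun x => x), PySem.List.max? all_x (fun x => x),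
        PySem.List.min? all_y (fun y => y), PySem.List.max? all_y (fun y => y) with
  | some left, some right, some top, some bottom => [left, top, right, bottom]
  | _, _, _, _ => []   -- min() of an empty list: ValueError, excluded by Pre_

-- ===== PORT B =====
def pvBBoxLoop : List (List (String × Int)) → Int → Int → Int → Int → List Int
  | [], left, right, top, bottom => [left, top, right, bottom]
  | v :: rest, left, right, top, bottom =>
      let x := pvGetKey v "x"
      let y := pvGetKey v "y"
      pvBBoxLoop rest (if x < left then x else left) (if right < x then x else right)
                      (if y < top then y else top) (if bottom < y then y else bottom)

def quad_ocr_to_rect_std_alt (vertices : List (List (String × Int))) : List Int :=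
  match vertices with
  | [] => []   -- B raises ValueError here, excluded by Pre_
  | first :: rest =>
      pvBBoxLoop rest (pvGetKey first "x") (pvGetKey first "x")
                      (pvGetKey first "y") (pvGetKey first "y")

-- ===== PRECONDITION & SPEC =====
-- Pre_ excludes exactly the inputs where Python A raises: empty vertices (ValueError
-- from min) and a vertex lacking key "x" or "y" (KeyError).
def Pre_quad_ocr_to_rect_std (vertices : List (List (String × Int))) : Prop :=
  vertices ≠ [] ∧ ∀ v ∈ vertices, (v.lookup "x").isSome ∧ (v.lookup "y").isSome
instance (vertices : List (List (String × Int))) : Decidable (Pre_quad_ocr_to_rect_std vertices) := by unfold Pre_quad_ocr_to_rect_std; infer_instance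

def pvWitness_quad_ocr_to_rect_std : (List (List (String × Int))) :=
  [[("x", 1), ("y", 2)], [("x", -3), ("y", 5)]]

def Spec_quad_ocr_to_rect_std (vertices : List (List (String × Int))) (out : List Int) : Prop := out = quad_ocr_to_rect_std_alt vertices
instance (vertices : List (List (String × Int))) (out : List Int) : Decidable (Spec_quad_ocr_to_rect_std vertices out) := by unfold Spec_quad_ocr_to_rect_std; infer_instance

-- ===== CLAIM (what is proved, stated in full; the proofs are below) =====
def Claim_equal_quad_ocr_to_rect_std : Prop := ∀ (vertices : List (List (String × Int))), Dom_quad_ocr_to_rect_std vertices → Pre_quad_ocr_to_rect_std vertices → Spec_quad_ocr_to_rect_std vertices (quad_ocr_to_rect_std vertices)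

-- ===== LEMMAS AND PROOFS =====

-- B's four-accumulator loop computes the four separate folds A's min/max reduce to.
theorem pvBBoxLoop_eq (rest : List (List (String × Int))) (l r t b : Int) :
    pvBBoxLoop rest l r t b =
      [(rest.map (fun v => pvGetKey v "x")).foldl min l,
       (rest.map (fun v => pvGetKey v "y")).foldl min t,
       (rest.map (fun v => pvGetKey v "x")).foldl max r,
       (rest.map (fun v => pvGetKey v "y")).foldl max b] := by
  induction rest generalizing l r t b with
  | nil => simp [pvBBoxLoop]
  | cons v rest ih =>
      have hmin : ∀ a x : Int, (if x < a then x else a) = min a x := by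
        intro a x; split <;> omega
      have hmax : ∀ a x : Int, (if a < x then x else a) = max a x := by
        intro a x; split <;> omega
      simp only [pvBBoxLoop, List.map_cons, List.foldl_cons, ih, hmin, hmax]

-- ===== VERDICT (by name: the statement is the Claim_ definition above) =====
theorem quad_ocr_to_rect_std_spec : Claim_equal_quad_ocr_to_rect_std := by
  intro vertices _ hpre
  obtain ⟨hne, -⟩ := hpre
  match vertices, hne with
  | first :: rest, _ =>
    show quad_ocr_to_rect_std (first :: rest) = quad_ocr_to_rect_std_alt (first :: rest)
    simp only [quad_ocr_to_rect_std, quad_ocr_to_rect_std_alt, List.map_cons,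
      PySem.List.min?_id_cons, PySem.List.max?_id_cons, pvBBoxLoop_eq]
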